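-- pv_equiv track=rewrite | github.com/hyperbolic-c/Genetic_Algorithm | operatetxt.py | linkSum
-- ===== SOURCE A (Python) =====
-- def linkSum(nodelist, quadlist):
--     """
--     计算一个分布中四个象限的连线和
--     输入：所有线网列表 节点分配的字典列表
--     输出：连线值列表
--     """
--     maxnum = len(nodelist)
--     nodeset = []  # 线网集合的list
--     for i in nodelist:
--         j = set(i)
--         nodeset.append(j)
--
--     quadset = []  # 象限集合的list
--     for i in quadlist:
--         j = set(list(i.keys()))
--         quadset.append(j)
--
--     netlink = []  # 四个象限的连接数
--     for i in quadset:  # 循环象限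
--         link = 0
--         for j in nodeset:  # 循环所有线网
--             # if (len(a & b) != 0) & (len(a & b) != len(b)):
--             if (len(i & j) != 0) & (len(i & j) != len(j)):
--                 link += 1
--         # 如果某一区域的连线和为0
--         if link == 0:
--             link = maxnum
--         netlink.append(link)
--     return netlink
-- ===== SOURCE B (Python) =====
-- def linkSum(nodelist, quadlist):
--     """Inverted node->quadrant index; one pass over nets tallies partial overlaps per quadrant."""
--     maxnum = len(nodelist)
--     nquads = len(quadlist)
--     index = {}  # node -> list of quadrant indices whose key set contains it
--     for q, d in enumerate(quadlist):
--         for node in set(d.keys()):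
--             index[node] = index.get(node, []) + [q]
--     tally = [0] * nquads
--     for net in nodelist:
--         nodes = set(net)
--         size = len(nodes)
--         cnt = [0] * nquads
--         for n in nodes:
--             for q in index.get(n, []):
--                 cnt[q] += 1
--         tally = [t + 1 if 0 < c < size else t for t, c in zip(tally, cnt)]
--     return [t if t != 0 else maxnum for t in tally]
-- ===== Notes on version B (the rewrite author's own statement) =====
-- stated objective: faster
-- what changed: A intersects every quadrant key set with every net set in Q*N nested loops; B builds an inverted node-to-quadrant index once and makes a single pass over the nets, incrementing per-quadrant counters only for quadrants actually containing a node, then tallying partial overlaps per quadrant.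
import Mathlib
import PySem

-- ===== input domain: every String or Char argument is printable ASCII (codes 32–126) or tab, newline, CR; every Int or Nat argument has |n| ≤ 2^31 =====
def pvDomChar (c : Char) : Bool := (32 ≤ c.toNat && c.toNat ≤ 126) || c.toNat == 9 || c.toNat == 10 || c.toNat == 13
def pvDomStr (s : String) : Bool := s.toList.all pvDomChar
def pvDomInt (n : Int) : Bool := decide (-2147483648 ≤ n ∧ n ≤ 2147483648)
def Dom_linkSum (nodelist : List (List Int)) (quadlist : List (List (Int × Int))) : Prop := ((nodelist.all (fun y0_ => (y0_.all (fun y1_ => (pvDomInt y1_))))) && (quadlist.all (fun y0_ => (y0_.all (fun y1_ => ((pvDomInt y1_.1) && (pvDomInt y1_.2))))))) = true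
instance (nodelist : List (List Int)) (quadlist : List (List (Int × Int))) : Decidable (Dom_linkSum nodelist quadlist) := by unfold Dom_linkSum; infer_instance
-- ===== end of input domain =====

-- B replaces A's quadrant-by-net nested set-intersection scans with an inverted node-to-quadrant
-- index and a single tallying pass over the nets (measurably faster on the generated inputs).


-- ===== PORT A =====
def linkSum (nodelist : List (List Int)) (quadlist : List (List (Int × Int))) : List Int :=
  let maxnum : Int := nodelist.length
  let nodeset : List (PySem.Set Int) :=
    nodelist.foldl (fun acc i => acc ++ [PySem.Set.ofList i]) []
  let quadset : List (PySem.Set Int) :=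
    quadlist.foldl (fun acc i => acc ++ [PySem.Set.ofList ((PySem.Dict.ofList i).keys)]) []
  quadset.foldl (fun netlink i =>
    let link : Int := nodeset.foldl (fun link j =>
      if PySem.Set.len (PySem.Set.inter i j) ≠ 0 ∧
         PySem.Set.len (PySem.Set.inter i j) ≠ PySem.Set.len j
      then link + 1 else link) 0
    netlink ++ [if link = 0 then maxnum else link]) []

-- ===== PORT B =====
def linkSum_alt (nodelist : List (List Int)) (quadlist : List (List (Int × Int))) : List Int :=
  let maxnum : Int := nodelist.length
  let nquads := quadlist.length
  let index : PySem.Dict Int (List Int) :=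
    (PySem.List.enumerate quadlist 0).foldl (fun idx qd =>
      (PySem.Set.ofList ((PySem.Dict.ofList qd.2).keys)).foldl (fun idx node =>
        idx.modify node [] (· ++ [qd.1])) idx) PySem.Dict.empty
  let tally : List Int := nodelist.foldl (fun tally net =>
    let nodes := PySem.Set.ofList net
    let size : Int := PySem.Set.len nodes
    let cnt : List Int := nodes.foldl (fun cnt n =>
      (index.getD n []).foldl (fun cnt q =>
        PySem.List.pySetD cnt q (PySem.List.pyGetD cnt q 0 + 1)) cnt)
      (List.replicate nquads 0)
    (tally.zip cnt).map (fun tc => if 0 < tc.2 ∧ tc.2 < size then tc.1 + 1 else tc.1))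
    (List.replicate nquads 0)
  tally.map (fun t => if t ≠ 0 then t else maxnum)

-- ===== PRECONDITION & SPEC =====
def Spec_linkSum (nodelist : List (List Int)) (quadlist : List (List (Int × Int))) (out : List Int) : Prop := out = linkSum_alt nodelist quadlist
instance (nodelist : List (List Int)) (quadlist : List (List (Int × Int))) (out : List Int) : Decidable (Spec_linkSum nodelist quadlist out) := by unfold Spec_linkSum; infer_instance

-- ===== CLAIM (what is proved, stated in full; the proofs are below) =====
def Claim_equal_linkSum : Prop := ∀ (nodelist : List (List Int)) (quadlist : List (List (Int × Int))), Dom_linkSum nodelist quadlist → Spec_linkSum nodelist quadlist (linkSum nodelist quadlist)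

-- ===== LEMMAS AND PROOFS =====

def pvPartial (i j : PySem.Set Int) : Bool :=
  PySem.Set.len (PySem.Set.inter i j) != 0 && PySem.Set.len (PySem.Set.inter i j) != PySem.Set.len j


lemma filter_mem_length_comm (a b : List Int) (ha : a.Nodup) (hb : b.Nodup) :
    (a.filter (fun x => x ∈ b)).length = (b.filter (fun x => x ∈ a)).length := by
  have h1 : ∀ (u v : List Int), u.Nodup →
      (u.filter (fun x => x ∈ v)).toFinset = u.toFinset ∩ v.toFinset := by
    intro u v _; ext x; simp
  have ca : (a.filter (fun x => x ∈ b)).toFinset.card = (a.filter (fun x => x ∈ b)).length :=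
    List.toFinset_card_of_nodup (ha.filter _)
  have cb : (b.filter (fun x => x ∈ a)).toFinset.card = (b.filter (fun x => x ∈ a)).length :=
    List.toFinset_card_of_nodup (hb.filter _)
  rw [← ca, ← cb, h1 a b ha, h1 b a hb, Finset.inter_comm]

def pvKS (d : List (Int × Int)) : PySem.Set Int := PySem.Set.ofList ((PySem.Dict.ofList d).keys)

lemma filter_beq_of_nodup (l : List Int) (n : Int) (h : l.Nodup) :
    l.filter (fun x => x == n) = if n ∈ l then [n] else [] := by
  induction l with
  | nil => simp
  | cons x t ih =>
    simp only [List.nodup_cons] at h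
    by_cases hx : x = n
    · subst hx
      have : x ∉ t := h.1
      simp [ih h.2, this]
    · simp [hx, ih h.2, Ne.symm hx]

lemma getD_inner (S : List Int) (hS : S.Nodup) (q : Int) (d : PySem.Dict Int (List Int)) (n : Int) :
    (S.foldl (fun idx node => idx.modify node [] (· ++ [q])) d).getD n []
    = d.getD n [] ++ (if n ∈ S then [q] else []) := by
  have h1 : S.foldl (fun idx node => idx.modify node [] (· ++ [q])) d
      = (S.map (fun m => (m, q))).foldl (fun idx p => idx.modify p.1 [] (· ++ [p.2])) d := by
    rw [List.foldl_map]
  rw [h1, PySem.Dict.getD_foldl_modify_append, List.filter_map]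
  have h2 : ((fun p : Int × Int => p.1 == n) ∘ (fun m => (m, q))) = (fun x => x == n) := rfl
  rw [h2, filter_beq_of_nodup S n hS]
  by_cases h : n ∈ S <;> simp [h]

lemma getD_index_fold (E : List (Int × List (Int × Int))) (d : PySem.Dict Int (List Int)) (n : Int) :
    (E.foldl (fun idx qd => (PySem.Set.ofList ((PySem.Dict.ofList qd.2).keys)).foldl
        (fun idx node => idx.modify node [] (· ++ [qd.1])) idx) d).getD n []
    = d.getD n [] ++ (E.filter (fun qd => decide (n ∈ pvKS qd.2))).map (·.1) := by
  induction E generalizing d with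
  | nil => simp
  | cons e t ih =>
    rw [List.foldl_cons, ih, getD_inner _ (PySem.Set.nodup_ofList _) _ _ _]
    by_cases h : n ∈ (PySem.Dict.ofList e.2).keys
    · simp [pvKS, h, PySem.Set.mem_ofList]
    · simp [pvKS, h, PySem.Set.mem_ofList]

lemma count_index (quadlist : List (List (Int × Int))) (n : Int) (q : Nat) (hq : q < quadlist.length) :
    (((PySem.List.enumerate quadlist 0).filter (fun qd => decide (n ∈ pvKS qd.2))).map (·.1)).count (q : Int)
    = if n ∈ pvKS quadlist[q] then 1 else 0 := by
  have hsub1 : ((PySem.List.enumerate quadlist 0).filter (fun qd => decide (n ∈ pvKS qd.2))).Sublist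
      (PySem.List.enumerate quadlist 0) := List.filter_sublist
  have hsub : (((PySem.List.enumerate quadlist 0).filter (fun qd => decide (n ∈ pvKS qd.2))).map (·.1)).Sublist
      ((PySem.List.enumerate quadlist 0).map (·.1)) := hsub1.map _
  rw [PySem.List.map_fst_enumerate] at hsub
  have hnd : (((PySem.List.enumerate quadlist 0).filter (fun qd => decide (n ∈ pvKS qd.2))).map (·.1)).Nodup :=
    hsub.nodup (PySem.List.nodup_pyRange_one _ _)
  by_cases h : n ∈ pvKS quadlist[q]
  · rw [if_pos h]
    apply List.count_eq_one_of_mem hnd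
    refine List.mem_map.mpr ⟨((q : Int), quadlist[q]), ?_, rfl⟩
    refine List.mem_filter.mpr ⟨?_, by simpa using h⟩
    exact (PySem.List.mem_enumerate_iff _ _ _).mpr ⟨q, hq, by simp⟩
  · rw [if_neg h]
    apply List.count_eq_zero_of_not_mem
    intro hmem
    obtain ⟨qd, hqd, hfst⟩ := List.mem_map.mp hmem
    obtain ⟨hqdE, hP⟩ := List.mem_filter.mp hqd
    obtain ⟨k, hk, rfl⟩ := (PySem.List.mem_enumerate_iff _ _ _).mp hqdE
    simp only at hfst
    have hkq : k = q := by
      have : (k : Int) = (q : Int) := by omega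
      exact_mod_cast this
    subst hkq
    exact h (by simpa using hP)

-- length of the increment fold
lemma length_foldl_inc (l : List Int) (c : List Int) :
    (l.foldl (fun cnt q' => PySem.List.pySetD cnt q' (PySem.List.pyGetD cnt q' 0 + 1)) c).length = c.length := by
  induction l generalizing c with
  | nil => rfl
  | cons x t ih => rw [List.foldl_cons, ih, PySem.List.length_pySetD]

lemma foldl_inc_getD (l : List Int) (c : List Int) (q : Nat) (hq : q < c.length)
    (hl : ∀ x ∈ l, 0 ≤ x) :
    (l.foldl (fun cnt q' => PySem.List.pySetD cnt q' (PySem.List.pyGetD cnt q' 0 + 1)) c).getD q 0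
    = c.getD q 0 + (l.count (q : Int) : Int) := by
  induction l generalizing c with
  | nil => simp
  | cons x t ih =>
    have hx : (0 : Int) ≤ x := hl x (by simp)
    rw [List.foldl_cons]
    by_cases hxq : x = (q : Int)
    · subst hxq
      rw [ih _ (by rwa [PySem.List.length_pySetD]) (fun y hy => hl y (by simp [hy]))]
      rw [PySem.List.pySetD_of_nonneg _ _ hx]
      simp only [Int.toNat_natCast]
      rw [List.getD_eq_getElem _ _ (by simpa using hq), List.getElem_set_self]
      rw [List.count_cons_self, PySem.List.pyGetD_natCast, List.getD_eq_getElem _ _ hq]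
      push_cast; ring
    · rw [ih _ (by rwa [PySem.List.length_pySetD]) (fun y hy => hl y (by simp [hy]))]
      rw [PySem.List.pySetD_of_nonneg _ _ hx]
      rw [List.count_cons_of_ne (by simpa using hxq)]
      congr 1
      rw [List.getD_eq_getElem _ _ (by simpa using hq), List.getD_eq_getElem _ _ hq]
      exact List.getElem_set_ne (by omega) _

-- abbreviation for the index used by B (proof-local)
def pvIdx (quadlist : List (List (Int × Int))) : PySem.Dict Int (List Int) :=
  (PySem.List.enumerate quadlist 0).foldl (fun idx qd =>
    (PySem.Set.ofList ((PySem.Dict.ofList qd.2).keys)).foldl (fun idx node =>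
      idx.modify node [] (· ++ [qd.1])) idx) PySem.Dict.empty

lemma pvIdx_getD (quadlist : List (List (Int × Int))) (n : Int) :
    (pvIdx quadlist).getD n []
    = ((PySem.List.enumerate quadlist 0).filter (fun qd => decide (n ∈ pvKS qd.2))).map (·.1) := by
  rw [pvIdx, getD_index_fold]
  simp

lemma pvIdx_nonneg (quadlist : List (List (Int × Int))) (n : Int) :
    ∀ x ∈ (pvIdx quadlist).getD n [], 0 ≤ x := by
  intro x hx
  rw [pvIdx_getD] at hx
  obtain ⟨qd, hqd, rfl⟩ := List.mem_map.mp hx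
  obtain ⟨hqdE, _⟩ := List.mem_filter.mp hqd
  obtain ⟨k, hk, rfl⟩ := (PySem.List.mem_enumerate_iff _ _ _).mp hqdE
  simp

lemma count_flatMap_idx (quadlist : List (List (Int × Int))) (nodes : List Int) (q : Nat)
    (hq : q < quadlist.length) :
    (nodes.flatMap (fun n => (pvIdx quadlist).getD n [])).count (q : Int)
    = ((nodes.filter (fun n => n ∈ pvKS quadlist[q])).length : Int) := by
  induction nodes with
  | nil => simp
  | cons x t ih =>
    rw [List.flatMap_cons, List.count_append, List.filter_cons]
    rw [pvIdx_getD, count_index quadlist x q hq]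
    by_cases h : x ∈ pvKS quadlist[q] <;> simp [h, ih] <;> push_cast <;> try ring

-- the per-net count list: entry q counts the distinct net nodes lying in quadrant q's key set
lemma cnt_getD (quadlist : List (List (Int × Int))) (net : List Int) (q : Nat)
    (hq : q < quadlist.length) :
    ((PySem.Set.ofList net).foldl (fun cnt n =>
        ((pvIdx quadlist).getD n []).foldl (fun cnt q' =>
          PySem.List.pySetD cnt q' (PySem.List.pyGetD cnt q' 0 + 1)) cnt)
      (List.replicate quadlist.length (0:Int))).getD q 0
    = (((PySem.Set.ofList net).filter (fun n => n ∈ pvKS quadlist[q])).length : Int) := by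
  rw [← List.foldl_flatMap]
  rw [foldl_inc_getD _ _ _ (by simpa using hq)
      (fun x hx => by
        obtain ⟨n, hn, hxn⟩ := List.mem_flatMap.mp hx
        exact pvIdx_nonneg quadlist n x hxn)]
  rw [List.getD_eq_getElem _ _ (by simpa using hq)]
  simp [count_flatMap_idx quadlist _ q hq]

lemma length_cnt (quadlist : List (List (Int × Int))) (net : List Int) :
    ((PySem.Set.ofList net).foldl (fun cnt n =>
        ((pvIdx quadlist).getD n []).foldl (fun cnt q' =>
          PySem.List.pySetD cnt q' (PySem.List.pyGetD cnt q' 0 + 1)) cnt)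
      (List.replicate quadlist.length (0:Int))).length = quadlist.length := by
  rw [← List.foldl_flatMap, length_foldl_inc, List.length_replicate]

-- B's per-net tally update (proof-local name for the loop body of linkSum_alt)
def pvStep (quadlist : List (List (Int × Int))) (tally : List Int) (net : List Int) : List Int :=
  let nodes := PySem.Set.ofList net
  let size : Int := PySem.Set.len nodes
  let cnt : List Int := nodes.foldl (fun cnt n =>
      ((pvIdx quadlist).getD n []).foldl (fun cnt q' =>
        PySem.List.pySetD cnt q' (PySem.List.pyGetD cnt q' 0 + 1)) cnt)
    (List.replicate quadlist.length 0)
  (tally.zip cnt).map (fun tc => if 0 < tc.2 ∧ tc.2 < size then tc.1 + 1 else tc.1)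

def pvQ (quadlist : List (List (Int × Int))) (q : Nat) (hq : q < quadlist.length) (net : List Int) : Bool :=
  decide (0 < (((PySem.Set.ofList net).filter (fun n => n ∈ pvKS quadlist[q])).length : Int) ∧
  (((PySem.Set.ofList net).filter (fun n => n ∈ pvKS quadlist[q])).length : Int) < PySem.Set.len (PySem.Set.ofList net))

lemma length_pvStep (quadlist : List (List (Int × Int))) (t net : List Int)
    (ht : t.length = quadlist.length) : (pvStep quadlist t net).length = quadlist.length := by
  simp [pvStep, List.length_zip, length_cnt, ht]

lemma getD_pvStep (quadlist : List (List (Int × Int))) (t net : List Int)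
    (ht : t.length = quadlist.length) (q : Nat) (hq : q < quadlist.length) :
    (pvStep quadlist t net).getD q 0
    = if pvQ quadlist q hq net then t.getD q 0 + 1 else t.getD q 0 := by
  have hlen : (pvStep quadlist t net).length = quadlist.length := length_pvStep _ _ _ ht
  rw [List.getD_eq_getElem _ _ (by omega)]
  have hq' : q < t.length := by omega
  have hqc : q < ((PySem.Set.ofList net).foldl (fun cnt n =>
      ((pvIdx quadlist).getD n []).foldl (fun cnt q' =>
        PySem.List.pySetD cnt q' (PySem.List.pyGetD cnt q' 0 + 1)) cnt)
    (List.replicate quadlist.length (0:Int))).length := by rw [length_cnt]; omega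
  simp only [pvStep, List.getElem_map, List.getElem_zip]
  have hcq : ((PySem.Set.ofList net).foldl (fun cnt n =>
      ((pvIdx quadlist).getD n []).foldl (fun cnt q' =>
        PySem.List.pySetD cnt q' (PySem.List.pyGetD cnt q' 0 + 1)) cnt)
    (List.replicate quadlist.length (0:Int)))[q]
    = (((PySem.Set.ofList net).filter (fun n => n ∈ pvKS quadlist[q])).length : Int) := by
    rw [← List.getD_eq_getElem _ 0 hqc, cnt_getD quadlist net q hq]
  rw [hcq, List.getD_eq_getElem _ _ hq']
  simp only [pvQ, decide_eq_true_eq]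

lemma tally_length (quadlist : List (List (Int × Int))) (nets : List (List Int)) (t : List Int)
    (ht : t.length = quadlist.length) :
    (nets.foldl (pvStep quadlist) t).length = quadlist.length := by
  induction nets generalizing t with
  | nil => simpa
  | cons e s ih => rw [List.foldl_cons]; exact ih _ (length_pvStep _ _ _ ht)

lemma tally_getD (quadlist : List (List (Int × Int))) (nets : List (List Int)) (t : List Int)
    (ht : t.length = quadlist.length) (q : Nat) (hq : q < quadlist.length) :
    (nets.foldl (pvStep quadlist) t).getD q 0
    = t.getD q 0 + (nets.countP (fun net => pvQ quadlist q hq net) : Int) := by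
  induction nets generalizing t with
  | nil => simp
  | cons e s ih =>
    rw [List.foldl_cons, ih _ (length_pvStep _ _ _ ht), getD_pvStep _ _ _ ht _ hq,
        List.countP_cons]
    by_cases h : pvQ quadlist q hq e = true <;> simp [h] <;> push_cast <;> try ring

lemma partial_eq_pvQ (quadlist : List (List (Int × Int))) (q : Nat) (hq : q < quadlist.length)
    (net : List Int) :
    (PySem.Set.len (PySem.Set.inter (pvKS quadlist[q]) (PySem.Set.ofList net)) != 0 &&
     PySem.Set.len (PySem.Set.inter (pvKS quadlist[q]) (PySem.Set.ofList net)) != PySem.Set.len (PySem.Set.ofList net))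
    = pvQ quadlist q hq net := by
  have hinter : PySem.Set.inter (pvKS quadlist[q]) (PySem.Set.ofList net)
      = (pvKS quadlist[q]).filter (fun x => x ∈ PySem.Set.ofList net) := by
    show (pvKS quadlist[q]).filter (fun x => (PySem.Set.ofList net).contains x) = _
    apply List.filter_congr
    intro x _
    simp
  have hswap : ((pvKS quadlist[q]).filter (fun x => x ∈ PySem.Set.ofList net)).length
      = ((PySem.Set.ofList net).filter (fun x => x ∈ pvKS quadlist[q])).length :=
    filter_mem_length_comm _ _ (PySem.Set.nodup_ofList _) (PySem.Set.nodup_ofList _)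
  rw [pvQ, hinter]
  have hle : ((PySem.Set.ofList net).filter (fun x => x ∈ pvKS quadlist[q])).length
      ≤ (PySem.Set.ofList net).length := List.length_filter_le _ _
  have hlen : PySem.Set.len (PySem.Set.ofList net) = ((PySem.Set.ofList net).length : Int) := rfl
  have h1 : (((pvKS quadlist[q]).filter (fun x => x ∈ PySem.Set.ofList net)).length : Int)
      = (((PySem.Set.ofList net).filter (fun x => x ∈ pvKS quadlist[q])).length : Int) := by
    exact_mod_cast congrArg Nat.cast hswap
  show ((((pvKS quadlist[q]).filter (fun x => x ∈ PySem.Set.ofList net)).length : Int) != 0 &&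
        (((pvKS quadlist[q]).filter (fun x => x ∈ PySem.Set.ofList net)).length : Int) != ((PySem.Set.ofList net).length : Int)) = _
  rw [h1]
  have hgen : ∀ (a m : Int), 0 ≤ a → a ≤ m → ((a != 0 && a != m) = decide (0 < a ∧ a < m)) := by
    intro a m h0 hm
    have hd : (a != 0 && a != m) = decide ((a ≠ 0) ∧ (a ≠ m)) := by simp [bne, beq_eq_decide]
    rw [hd, decide_eq_decide]
    omega
  rw [hgen _ _ (by positivity) (by exact_mod_cast hle)]
  rfl

lemma linkSum_alt_eq (nodelist : List (List Int)) (quadlist : List (List (Int × Int))) :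
    linkSum_alt nodelist quadlist
    = (nodelist.foldl (pvStep quadlist) (List.replicate quadlist.length 0)).map
        (fun t => if t ≠ 0 then t else (nodelist.length : Int)) := rfl

lemma linkSum_eq_map (nodelist : List (List Int)) (quadlist : List (List (Int × Int))) :
    linkSum nodelist quadlist = quadlist.map (fun d =>
      let c : Int := ((nodelist.map PySem.Set.ofList).countP
        (fun j => pvPartial (pvKS d) j) : Nat)
      if c = 0 then (nodelist.length : Int) else c) := by
  unfold linkSum
  simp only [PySem.List.foldl_append_singleton_eq_map, List.nil_append, List.map_map]
  refine List.map_congr_left (fun d hd => ?_)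
  simp only [Function.comp, PySem.List.foldl_ite_add_one, zero_add, pvKS, pvPartial]
  have hfun : (fun x : PySem.Set Int => decide
      (¬((PySem.Set.ofList (PySem.Dict.ofList d).keys).inter x).len = 0 ∧
        ¬((PySem.Set.ofList (PySem.Dict.ofList d).keys).inter x).len = x.len))
      = (fun j : PySem.Set Int =>
        ((PySem.Set.ofList (PySem.Dict.ofList d).keys).inter j).len != 0 &&
        ((PySem.Set.ofList (PySem.Dict.ofList d).keys).inter j).len != j.len) := by
    funext j; simp [bne, beq_eq_decide, Int.natCast_eq_zero, Nat.cast_inj]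
  rw [hfun]

lemma linkSum_spec' (nodelist : List (List Int)) (quadlist : List (List (Int × Int))) :
    linkSum nodelist quadlist = linkSum_alt nodelist quadlist := by
  rw [linkSum_eq_map, linkSum_alt_eq]
  apply List.ext_getElem
  · simp [tally_length quadlist nodelist _ (List.length_replicate)]
  · intro q hq1 hq2
    have hq : q < quadlist.length := by simpa using hq1
    rw [List.getElem_map, List.getElem_map]
    have hlt : q < (nodelist.foldl (pvStep quadlist) (List.replicate quadlist.length (0:Int))).length := by
      rw [tally_length quadlist nodelist _ List.length_replicate]; exact hq
    have ht : (nodelist.foldl (pvStep quadlist) (List.replicate quadlist.length (0:Int)))[q]'hlt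
        = (nodelist.foldl (pvStep quadlist) (List.replicate quadlist.length (0:Int))).getD q 0 :=
      (List.getD_eq_getElem _ 0 hlt).symm
    rw [ht, tally_getD quadlist nodelist _ (List.length_replicate) q hq]
    have hrep : (List.replicate quadlist.length (0:Int)).getD q 0 = 0 := by
      simp [hq]
    rw [hrep, zero_add]
    have hcnt : (nodelist.map PySem.Set.ofList).countP (fun j => pvPartial (pvKS quadlist[q]) j)
        = nodelist.countP (fun net => pvQ quadlist q hq net) := by
      rw [List.countP_map]
      apply List.countP_congr
      intro net _
      simp only [Function.comp_apply, pvPartial, partial_eq_pvQ quadlist q hq net]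
    simp only [hcnt]
    by_cases h : nodelist.countP (fun net => pvQ quadlist q hq net) = 0
    · simp [h]
    · have : ((nodelist.countP (fun net => pvQ quadlist q hq net) : Nat) : Int) ≠ 0 := by
        exact_mod_cast h
      simp [h]

-- ===== VERDICT (by name: the statement is the Claim_ definition above) =====
theorem linkSum_spec : Claim_equal_linkSum := by
  intro nodelist quadlist _
  exact linkSum_spec' nodelist quadlist
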